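-- pv_equiv track=rewrite | github.com/nj94ray39/installation-Scripts | yelp_kafka_tool/kafka_cluster_manager/cluster_info/stats.py | get_net_imbalance
-- ===== SOURCE A (Python) =====
-- def get_net_imbalance(count_per_broker):
--     """Calculate and return net imbalance based on given count of
--     partitions or leaders per broker.
--
--     Net-imbalance in case of partitions implies total number of
--     extra partitions from optimal count over all brokers.
--     This is also implies, the minimum number of partition movements
--     required for overall balancing.
--
--     For leaders, net imbalance implies total number of extra brokers
--     as leaders from optimal count.
--     """
--     net_imbalance = 0
--     opt_count = sum(count_per_broker) // len(count_per_broker)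
--     more_opt_count_allowed = sum(count_per_broker) % len(count_per_broker)
--     for count in count_per_broker:
--         if count > opt_count:
--             if more_opt_count_allowed > 0:
--                 more_opt_count_allowed -= 1
--                 net_imbalance += (count - opt_count - 1)
--             else:
--                 net_imbalance += (count - opt_count)
--     return net_imbalance
-- ===== SOURCE B (Python) =====
-- def get_net_imbalance(count_per_broker):
--     n = len(count_per_broker)
--     total = sum(count_per_broker)
--     opt_count = total // n
--     remainder = total % n
--     excess = sum(c - opt_count for c in count_per_broker if c > opt_count)
--     num_over = sum(1 for c in count_per_broker if c > opt_count)
--     return excess - min(remainder, num_over)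
-- ===== Notes on version B (the rewrite author's own statement) =====
-- stated objective: simpler
-- what changed: Replaces the stateful allowance-threading loop by two order-independent aggregates (excess sum and over-optimal count) combined with a capped subtraction min(remainder, num_over).
import Mathlib
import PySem

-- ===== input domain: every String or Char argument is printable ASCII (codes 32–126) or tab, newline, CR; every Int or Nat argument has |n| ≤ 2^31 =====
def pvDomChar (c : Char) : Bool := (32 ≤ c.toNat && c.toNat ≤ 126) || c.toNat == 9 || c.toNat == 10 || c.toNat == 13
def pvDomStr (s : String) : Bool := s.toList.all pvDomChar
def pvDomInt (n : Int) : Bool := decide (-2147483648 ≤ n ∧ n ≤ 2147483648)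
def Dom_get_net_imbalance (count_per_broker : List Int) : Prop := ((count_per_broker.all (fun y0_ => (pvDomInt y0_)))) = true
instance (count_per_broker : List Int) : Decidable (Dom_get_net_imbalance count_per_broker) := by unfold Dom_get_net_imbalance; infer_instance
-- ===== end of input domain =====

-- B replaces A's stateful allowance-threading loop by two order-independent aggregates
-- (excess sum, over-optimal count) combined with min(remainder, num_over); same O(n) cost.

-- ===== PORT A =====
-- literal transliteration: the for-loop threads (more_opt_count_allowed, net_imbalance)
def get_net_imbalance (count_per_broker : List Int) : Int :=
  let opt_count := PySem.Int.floordiv count_per_broker.sum (count_per_broker.length : Int)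
  let more0 := PySem.Int.mod count_per_broker.sum (count_per_broker.length : Int)
  let st := count_per_broker.foldl
    (fun (s : Int × Int) count =>
      if count > opt_count then
        if s.1 > 0 then (s.1 - 1, s.2 + (count - opt_count - 1))
        else (s.1, s.2 + (count - opt_count))
      else s)
    (more0, 0)
  st.2

-- ===== PORT B =====
def get_net_imbalance_alt (count_per_broker : List Int) : Int :=
  let n : Int := count_per_broker.length
  let total := count_per_broker.sum
  let opt_count := PySem.Int.floordiv total n
  let remainder := PySem.Int.mod total n
  let ovr := count_per_broker.filter (fun c => opt_count < c)
  let excess := (ovr.map (fun c => c - opt_count)).sum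
  let num_over : Int := ovr.length
  excess - min remainder num_over

-- ===== PRECONDITION & SPEC =====
-- Pre_ excludes the empty list, on which Python A raises ZeroDivisionError.
def Pre_get_net_imbalance (count_per_broker : List Int) : Prop := count_per_broker ≠ []
instance (count_per_broker : List Int) : Decidable (Pre_get_net_imbalance count_per_broker) := by unfold Pre_get_net_imbalance; infer_instance
def pvWitness_get_net_imbalance : List Int := [5, 0, 0]

def Spec_get_net_imbalance (count_per_broker : List Int) (out : Int) : Prop := out = get_net_imbalance_alt count_per_broker
instance (count_per_broker : List Int) (out : Int) : Decidable (Spec_get_net_imbalance count_per_broker out) := by unfold Spec_get_net_imbalance; infer_instance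

-- ===== CLAIM =====
def Claim_equal_get_net_imbalance : Prop := ∀ (count_per_broker : List Int), Dom_get_net_imbalance count_per_broker → Pre_get_net_imbalance count_per_broker → Spec_get_net_imbalance count_per_broker (get_net_imbalance count_per_broker)

-- ===== LEMMAS AND PROOFS =====

-- A's loop, for any starting allowance a ≥ 0 and accumulator acc, ends with
-- acc + excess − min a num_over: each over-optimal element consumes one allowance
-- unit until the allowance is exhausted.
theorem loop_closed_form (opt : Int) :
    ∀ (l : List Int) (a acc : Int), 0 ≤ a →
      (l.foldl
        (fun (s : Int × Int) count =>
          if count > opt then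
            if s.1 > 0 then (s.1 - 1, s.2 + (count - opt - 1))
            else (s.1, s.2 + (count - opt))
          else s)
        (a, acc)).2
      = acc + ((l.filter (fun c => opt < c)).map (fun c => c - opt)).sum
          - min a ((l.filter (fun c => opt < c)).length : Int) := by
  intro l
  induction l with
  | nil =>
      intro a acc ha
      simp [min_eq_right ha]
  | cons c t ih =>
      intro a acc ha
      by_cases hc : c > opt
      · have hlen : (0 : Int) ≤ ((t.filter (fun c => opt < c)).length : Int) :=
          Int.natCast_nonneg _
        by_cases hpos : a > 0
        · have := ih (a - 1) (acc + (c - opt - 1)) (by omega)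
          simp [List.foldl, hc, hpos, List.filter, this]
          omega
        · have := ih a (acc + (c - opt)) ha
          simp [List.foldl, hc, hpos, List.filter, this]
          omega
      · have := ih a acc ha
        simp [List.foldl, hc, List.filter, this]

-- ===== VERDICT =====
theorem get_net_imbalance_spec : Claim_equal_get_net_imbalance := by
  intro l _ hpre
  have hn : (0 : Int) < (l.length : Int) := by
    have : l.length ≠ 0 := fun h => hpre (List.eq_nil_of_length_eq_zero h)
    omega
  have hmod : 0 ≤ PySem.Int.mod l.sum (l.length : Int) :=
    PySem.Int.mod_nonneg _ hn
  unfold Spec_get_net_imbalance get_net_imbalance get_net_imbalance_alt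
  simp only
  rw [loop_closed_form _ _ _ _ hmod]
  ring
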